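-- pv_equiv track=rewrite | github.com/msea1/Advent | python/src/day_01a.py | find_most_calories_carried
-- ===== SOURCE A (Python) =====
-- def find_most_calories_carried(input_str: str) -> int:
--     max_calories_seen = 0
--     if not input_str:
--         return max_calories_seen
--     per_elf_list = turn_input_list_into_list_per_elf(input_str)
--     for elf_load in per_elf_list:
--         elfs_sum = sum(elf_load)
--         max_calories_seen = max(max_calories_seen, elfs_sum)
--     return max_calories_seen
--
-- def turn_input_list_into_list_per_elf(input_str: str) -> list[list[int]]:
--     # turn string input into usable data structure
--     # first into a list of strings, one per line, including the extra blanks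
--     # e.g. '1 \n 2 \n 3 \n\n 4 \n 5' -> ['1', '2', '3', '', '4', '5']
--     # then coalesce around the extra blanks so that you get one entry per elf
--     # e.g. [ [1, 2, 3], [4, 5] ]
--
--     expanded_list = [i.strip() for i in input_str.splitlines()]
--     condensed_list = [[]]
--     elf_counter = 0
--     for entry in expanded_list:
--         if entry == "":
--             elf_counter += 1
--             condensed_list.append([])
--         else:
--             condensed_list[elf_counter].append(int(entry))
--     return condensed_list
-- ===== SOURCE B (Python) =====
-- def find_most_calories_carried(input_str: str) -> int:
--     # Single fused pass: running group sum + running max, no intermediate list of lists.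
--     if not input_str:
--         return 0
--     max_seen = 0
--     current = 0
--     for line in input_str.splitlines():
--         line = line.strip()
--         if line == "":
--             max_seen = max(max_seen, current)
--             current = 0
--         else:
--             current += int(line)
--     return max(max_seen, current)
-- ===== Notes on version B (the rewrite author's own statement) =====
-- stated objective: simpler
-- what changed: Fused the parse-into-list-of-lists stage and the summing stage into one pass that keeps only a running group sum and the max seen, dropping the intermediate list of lists.
import Mathlib
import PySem

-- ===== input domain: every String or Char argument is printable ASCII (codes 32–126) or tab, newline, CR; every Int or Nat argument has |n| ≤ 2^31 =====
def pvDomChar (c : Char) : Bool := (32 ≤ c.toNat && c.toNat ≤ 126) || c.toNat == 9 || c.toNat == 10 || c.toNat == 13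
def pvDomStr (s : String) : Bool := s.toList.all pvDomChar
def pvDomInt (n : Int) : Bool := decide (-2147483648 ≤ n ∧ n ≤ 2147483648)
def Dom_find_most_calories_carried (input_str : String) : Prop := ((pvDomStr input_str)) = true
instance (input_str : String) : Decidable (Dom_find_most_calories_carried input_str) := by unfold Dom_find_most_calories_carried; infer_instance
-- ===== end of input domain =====

-- B fuses A's parse-into-list-of-lists stage and the summing stage into one pass keeping only
-- a running group sum and the max seen (objective: simpler).

-- ===== PORT A =====
-- int(entry): Pre_ guarantees ofStr? = some; .getD 0 never fires under Pre_ (Python raises ValueError there).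
def turn_input_list_into_list_per_elf (input_str : String) : List (List Int) :=
  let expanded := (PySem.Str.splitlines input_str).map PySem.Str.strip
  let st := expanded.foldl
    (fun (st : List (List Int) × Nat) entry =>
      if entry = "" then (st.1 ++ [[]], st.2 + 1)
      else (st.1.modify st.2 (fun xs => xs ++ [(PySem.Int.ofStr? entry).getD 0]), st.2))
    ([[]], 0)
  st.1

def find_most_calories_carried (input_str : String) : Int :=
  let max_calories_seen : Int := 0
  if input_str = "" then max_calories_seen
  else
    let per_elf_list := turn_input_list_into_list_per_elf input_str
    per_elf_list.foldl (fun m elf_load => max m (elf_load.foldl (· + ·) 0)) max_calories_seen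

-- ===== PORT B =====
def find_most_calories_carried_alt (input_str : String) : Int :=
  if input_str = "" then 0
  else
    let st := (PySem.Str.splitlines input_str).foldl
      (fun (p : Int × Int) line =>
        let line := PySem.Str.strip line
        if line = "" then (max p.1 p.2, 0) else (p.1, p.2 + (PySem.Int.ofStr? line).getD 0))
      (0, 0)
    max st.1 st.2

-- ===== PRECONDITION & SPEC =====
-- Pre_ excludes exactly the inputs where A raises ValueError: a line whose stripped form is
-- non-empty but not a Python int literal.
def Pre_find_most_calories_carried (input_str : String) : Prop :=
  ((PySem.Str.splitlines input_str).all
    (fun l => PySem.Str.strip l == "" || (PySem.Int.ofStr? (PySem.Str.strip l)).isSome)) = true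
instance (input_str : String) : Decidable (Pre_find_most_calories_carried input_str) := by
  unfold Pre_find_most_calories_carried; infer_instance
def pvWitness_find_most_calories_carried : String := "1 \n 2 \n 3 \n\n 4 \n 5"

def Spec_find_most_calories_carried (input_str : String) (out : Int) : Prop := out = find_most_calories_carried_alt input_str
instance (input_str : String) (out : Int) : Decidable (Spec_find_most_calories_carried input_str out) := by unfold Spec_find_most_calories_carried; infer_instance

-- ===== CLAIM (what is proved, stated in full; the proofs are below) =====
def Claim_equal_find_most_calories_carried : Prop := ∀ (input_str : String), Dom_find_most_calories_carried input_str → Pre_find_most_calories_carried input_str → Spec_find_most_calories_carried input_str (find_most_calories_carried input_str)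

-- ===== LEMMAS AND PROOFS =====

def pvMSum (done : List (List Int)) : Int :=
  done.foldl (fun m g => max m (g.foldl (· + ·) 0)) 0

theorem pvModify_last (done : List (List Int)) (cur : List Int) (f : List Int → List Int) :
    (done ++ [cur]).modify done.length f = done ++ [f cur] := by
  induction done with
  | nil => simp [List.modify]
  | cons h t ih =>
    simpa [List.cons_append, List.length_cons, List.modify_cons] using ih

theorem pvMSum_append (done : List (List Int)) (cur : List Int) :
    pvMSum (done ++ [cur]) = max (pvMSum done) (cur.foldl (· + ·) 0) := by
  simp [pvMSum, List.foldl_append]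

theorem pvKey (lines : List String) (done : List (List Int)) (cur : List Int) (m c : Int)
    (hm : m = pvMSum done) (hc : c = cur.foldl (· + ·) 0) :
    pvMSum ((lines.foldl
      (fun (st : List (List Int) × Nat) entry =>
        if PySem.Str.strip entry = "" then (st.1 ++ [[]], st.2 + 1)
        else (st.1.modify st.2 (fun xs => xs ++ [(PySem.Int.ofStr? (PySem.Str.strip entry)).getD 0]), st.2))
      (done ++ [cur], done.length)).1)
    = (let st := lines.foldl
        (fun (p : Int × Int) line =>
          let line := PySem.Str.strip line
          if line = "" then (max p.1 p.2, 0) else (p.1, p.2 + (PySem.Int.ofStr? line).getD 0))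
        (m, c);
       max st.1 st.2) := by
  induction lines generalizing done cur m c with
  | nil =>
    simp only [List.foldl_nil, pvMSum_append, hm, hc]
  | cons l ls ih =>
    by_cases h : PySem.Str.strip l = ""
    · simp only [List.foldl_cons, h, if_true]
      have : done ++ [cur] ++ [[]] = (done ++ [cur]) ++ [([] : List Int)] := by simp
      rw [this]
      have hlen : done.length + 1 = (done ++ [cur]).length := by simp
      rw [hlen]
      exact ih (done ++ [cur]) [] (max m c) 0
        (by rw [pvMSum_append, hm, hc]) (by simp)
    · simp only [List.foldl_cons, if_neg h]
      rw [pvModify_last]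
      exact ih done (cur ++ [(PySem.Int.ofStr? (PySem.Str.strip l)).getD 0]) m
        (c + (PySem.Int.ofStr? (PySem.Str.strip l)).getD 0) hm
        (by rw [List.foldl_append, ← hc]; simp)

-- ===== VERDICT (by name: the statement is the Claim_ definition above) =====
theorem find_most_calories_carried_spec : Claim_equal_find_most_calories_carried := by
  intro input_str _ _
  unfold Spec_find_most_calories_carried find_most_calories_carried
    find_most_calories_carried_alt turn_input_list_into_list_per_elf
  by_cases h : input_str = ""
  · simp [h]
  · simp only [if_neg h]
    have := pvKey (PySem.Str.splitlines input_str) [] [] 0 0 rfl rfl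
    simp only [List.nil_append, List.length_nil] at this
    rw [List.foldl_map]
    exact this
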